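-- pv_equiv track=rewrite | github.com/cognizant-ai-lab/terralingua | analysis_scripts/004_artifact_analysis.py | prune_low_novelty_artifacts
-- ===== SOURCE A (Python) =====
-- PRUNE_BATCH_SIZE = (
--     5  # Number of artifacts to remove per iteration when context is too large
-- )
--
-- PRUNE_NOVELTY_THRESHOLD = 1  # Only prune artifacts with novelty <= this value
--
-- def prune_low_novelty_artifacts(previous_artifacts, batch_size=PRUNE_BATCH_SIZE):
--     """
--     Remove up to batch_size artifacts with novelty <= PRUNE_NOVELTY_THRESHOLD.
--     Returns the pruned list and the number of artifacts removed.
--     """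
--     artifacts_to_remove = []
--     for idx, art in enumerate(previous_artifacts):
--         if art.get("novelty", 0) <= PRUNE_NOVELTY_THRESHOLD:
--             artifacts_to_remove.append(idx)
--             if len(artifacts_to_remove) == batch_size:
--                 break
--
--     pruned_artifacts = [
--         art
--         for idx, art in enumerate(previous_artifacts)
--         if idx not in artifacts_to_remove
--     ]
--
--     return pruned_artifacts, len(artifacts_to_remove)
-- ===== SOURCE B (Python) =====
-- PRUNE_BATCH_SIZE = 5
--
-- PRUNE_NOVELTY_THRESHOLD = 1
--
--
-- def prune_low_novelty_artifacts(previous_artifacts, batch_size=PRUNE_BATCH_SIZE):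
--     """Single pass: skip up to batch_size low-novelty artifacts, keep the rest."""
--     pruned_artifacts = []
--     removed = 0
--     for art in previous_artifacts:
--         if removed < batch_size and art.get("novelty", 0) <= PRUNE_NOVELTY_THRESHOLD:
--             removed += 1
--         else:
--             pruned_artifacts.append(art)
--     return pruned_artifacts, removed
-- ===== Notes on version B (the rewrite author's own statement) =====
-- stated objective: simpler
-- what changed: Replaces A's two passes (collect removable indices with a break, then re-enumerate and filter by list membership) with one pass carrying a removed counter, dropping the index list and the 'idx not in' scan.
-- intended difference: When batch_size <= 0 and the list contains a low-novelty artifact, A's break never fires so A removes ALL low-novelty artifacts, while B removes none; 'remove up to batch_size' with a non-positive batch_size should remove nothing, so B's value is the intended one. — e.g. on prune_low_novelty_artifacts([[("novelty", 0)]], 0): A returns ([], 1), B returns ([[("novelty", 0)]], 0)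
import Mathlib
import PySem

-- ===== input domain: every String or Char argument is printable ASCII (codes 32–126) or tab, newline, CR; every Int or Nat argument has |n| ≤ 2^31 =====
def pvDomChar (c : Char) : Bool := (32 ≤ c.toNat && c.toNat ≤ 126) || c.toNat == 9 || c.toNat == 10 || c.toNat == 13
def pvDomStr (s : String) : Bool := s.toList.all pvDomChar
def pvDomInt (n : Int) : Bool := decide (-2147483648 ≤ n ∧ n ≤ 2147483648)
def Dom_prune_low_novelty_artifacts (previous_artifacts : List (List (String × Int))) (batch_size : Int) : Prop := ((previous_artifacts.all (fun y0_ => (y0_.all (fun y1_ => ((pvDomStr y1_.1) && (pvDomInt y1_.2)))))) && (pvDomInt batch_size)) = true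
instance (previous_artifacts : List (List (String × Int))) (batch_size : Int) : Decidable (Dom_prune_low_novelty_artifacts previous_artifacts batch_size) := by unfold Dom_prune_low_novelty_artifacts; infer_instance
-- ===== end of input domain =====

-- B replaces A's two passes (collect removable indices with a break, then filter by index
-- membership) with one pass over the artifacts carrying a removed counter (objective: simpler);
-- on batch_size ≤ 0 with a low-novelty artifact present A removes all such artifacts, B none (see D_).


-- ===== PORT A =====
-- art.get("novelty", 0): first-match lookup in the association list (PySem.Dict)
def pvNovelty (art : List (String × Int)) : Int := (PySem.Dict.mk art).getD "novelty" 0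

-- first loop of A: enumerate, collect indices of low-novelty artifacts, break at batch_size
def pvA_collect (l : List (List (String × Int))) (idx : Int) (acc : List Int) (batch_size : Int) : List Int :=
  match l with
  | [] => acc
  | art :: rest =>
    if pvNovelty art ≤ 1 then
      let acc' := acc ++ [idx]
      if (acc'.length : Int) = batch_size then acc'
      else pvA_collect rest (idx + 1) acc' batch_size
    else pvA_collect rest (idx + 1) acc batch_size

-- second pass of A: the comprehension keeping artifacts whose index is not in the remove list
def pvA_filter (l : List (List (String × Int))) (idx : Int) (rm : List Int) : List (List (String × Int)) :=
  match l with
  | [] => []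
  | art :: rest =>
    if idx ∈ rm then pvA_filter rest (idx + 1) rm
    else art :: pvA_filter rest (idx + 1) rm

def prune_low_novelty_artifacts (previous_artifacts : List (List (String × Int))) (batch_size : Int) : (List (List (String × Int))) × Int :=
  let artifacts_to_remove := pvA_collect previous_artifacts 0 [] batch_size
  let pruned_artifacts := pvA_filter previous_artifacts 0 artifacts_to_remove
  (pruned_artifacts, (artifacts_to_remove.length : Int))

-- ===== PORT B =====
-- B's single loop: skip a low-novelty artifact while removed < batch_size, else keep it
def pvB_loop (l : List (List (String × Int))) (removed : Int) (batch_size : Int) : (List (List (String × Int))) × Int :=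
  match l with
  | [] => ([], removed)
  | art :: rest =>
    if removed < batch_size ∧ pvNovelty art ≤ 1 then
      pvB_loop rest (removed + 1) batch_size
    else
      let r := pvB_loop rest removed batch_size
      (art :: r.1, r.2)

def prune_low_novelty_artifacts_alt (previous_artifacts : List (List (String × Int))) (batch_size : Int) : (List (List (String × Int))) × Int :=
  pvB_loop previous_artifacts 0 batch_size

-- ===== PRECONDITION & SPEC =====
-- When batch_size ≤ 0 and some low-novelty artifact is present, A's break never fires and A
-- removes ALL low-novelty artifacts; B removes none, which is the intended reading of
-- "remove up to batch_size" for a non-positive batch_size.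
def D_prune_low_novelty_artifacts (previous_artifacts : List (List (String × Int))) (batch_size : Int) : Prop :=
  batch_size ≤ 0 ∧ ∃ art ∈ previous_artifacts, (PySem.Dict.mk art).getD "novelty" 0 ≤ 1
instance (previous_artifacts : List (List (String × Int))) (batch_size : Int) : Decidable (D_prune_low_novelty_artifacts previous_artifacts batch_size) := by unfold D_prune_low_novelty_artifacts; infer_instance

def Spec_prune_low_novelty_artifacts (previous_artifacts : List (List (String × Int))) (batch_size : Int) (out : (List (List (String × Int))) × Int) : Prop := ¬ D_prune_low_novelty_artifacts previous_artifacts batch_size → out = prune_low_novelty_artifacts_alt previous_artifacts batch_size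
instance (previous_artifacts : List (List (String × Int))) (batch_size : Int) (out : (List (List (String × Int))) × Int) : Decidable (Spec_prune_low_novelty_artifacts previous_artifacts batch_size out) := by unfold Spec_prune_low_novelty_artifacts; infer_instance

def pvDiffWitness_prune_low_novelty_artifacts : (List (List (String × Int))) × Int := ([[("novelty", 0)]], 0)
def pvDiffWitnessOut_prune_low_novelty_artifacts : ((List (List (String × Int))) × Int) × ((List (List (String × Int))) × Int) :=
  (([], 1), ([[("novelty", 0)]], 0))

-- ===== CLAIM (what is proved, stated in full; the proofs are below) =====
def Claim_unchanged_prune_low_novelty_artifacts : Prop := ∀ (previous_artifacts : List (List (String × Int))) (batch_size : Int), Dom_prune_low_novelty_artifacts previous_artifacts batch_size → Spec_prune_low_novelty_artifacts previous_artifacts batch_size (prune_low_novelty_artifacts previous_artifacts batch_size)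
def Claim_changed_prune_low_novelty_artifacts : Prop := Dom_prune_low_novelty_artifacts (pvDiffWitness_prune_low_novelty_artifacts.1) (pvDiffWitness_prune_low_novelty_artifacts.2) ∧ D_prune_low_novelty_artifacts (pvDiffWitness_prune_low_novelty_artifacts.1) (pvDiffWitness_prune_low_novelty_artifacts.2) ∧ prune_low_novelty_artifacts (pvDiffWitness_prune_low_novelty_artifacts.1) (pvDiffWitness_prune_low_novelty_artifacts.2) = pvDiffWitnessOut_prune_low_novelty_artifacts.1 ∧ prune_low_novelty_artifacts_alt (pvDiffWitness_prune_low_novelty_artifacts.1) (pvDiffWitness_prune_low_novelty_artifacts.2) = pvDiffWitnessOut_prune_low_novelty_artifacts.2 ∧ pvDiffWitnessOut_prune_low_novelty_artifacts.1 ≠ pvDiffWitnessOut_prune_low_novelty_artifacts.2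
def Claim_exact_prune_low_novelty_artifacts : Prop := ∀ (previous_artifacts : List (List (String × Int))) (batch_size : Int), Dom_prune_low_novelty_artifacts previous_artifacts batch_size → D_prune_low_novelty_artifacts previous_artifacts batch_size → prune_low_novelty_artifacts previous_artifacts batch_size ≠ prune_low_novelty_artifacts_alt previous_artifacts batch_size

-- ===== LEMMAS AND PROOFS =====

theorem pvA_filter_of_lt (l : List (List (String × Int))) (idx : Int) (rm : List Int)
    (h : ∀ x ∈ rm, x < idx) : pvA_filter l idx rm = l := by
  induction l generalizing idx with
  | nil => rfl
  | cons art rest ih =>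
    have hne : idx ∉ rm := fun hm => absurd (h idx hm) (lt_irrefl idx)
    simp only [pvA_filter, if_neg hne]
    exact congrArg (art :: ·) (ih (idx + 1) (fun x hx => lt_trans (h x hx) (by omega)))

theorem pvA_filter_cons_lt (l : List (List (String × Int))) (idx x : Int) (rm : List Int)
    (h : x < idx) : pvA_filter l idx (x :: rm) = pvA_filter l idx rm := by
  induction l generalizing idx with
  | nil => rfl
  | cons art rest ih =>
    by_cases hm : idx ∈ rm
    · simp only [pvA_filter, if_pos hm, if_pos (List.mem_cons.mpr (Or.inr hm))]
      exact ih (idx + 1) (by omega)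
    · have hm' : idx ∉ x :: rm := by
        intro hmem
        rcases List.mem_cons.mp hmem with h' | h'
        · omega
        · exact hm h'
      simp only [pvA_filter, if_neg hm, if_neg hm']
      exact congrArg (art :: ·) (ih (idx + 1) (by omega))

theorem pvA_collect_acc (l : List (List (String × Int))) (idx : Int) (acc : List Int) (bs : Int) :
    pvA_collect l idx acc bs = acc ++ pvA_collect l idx [] (bs - acc.length) := by
  induction l generalizing idx acc bs with
  | nil => simp [pvA_collect]
  | cons art rest ih =>
    by_cases hc : pvNovelty art ≤ 1
    · simp only [pvA_collect, if_pos hc, List.nil_append]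
      by_cases hb : ((acc ++ [idx]).length : Int) = bs
      · rw [if_pos hb, if_pos (show (([idx] : List Int).length : Int) = bs - acc.length by
          simp at hb ⊢; omega)]
      · rw [if_neg hb, if_neg (show ¬ ((([idx] : List Int).length : Int) = bs - acc.length) by
          simp at hb ⊢; omega)]
        rw [ih (idx + 1) (acc ++ [idx]) bs, ih (idx + 1) [idx] (bs - (acc.length : Int))]
        have he : bs - ((acc ++ [idx]).length : Int) = bs - (acc.length : Int) - (([idx] : List Int).length : Int) := by
          simp; omega
        rw [he, List.append_assoc]
    · simp only [pvA_collect, if_neg hc]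
      exact ih (idx + 1) acc bs

theorem pvA_collect_ge (l : List (List (String × Int))) (idx : Int) (bs : Int) :
    ∀ x ∈ pvA_collect l idx [] bs, idx ≤ x := by
  induction l generalizing idx bs with
  | nil => simp [pvA_collect]
  | cons art rest ih =>
    intro x hx
    by_cases hc : pvNovelty art ≤ 1
    · simp only [pvA_collect, if_pos hc, List.nil_append] at hx
      by_cases hb : ((([idx] : List Int)).length : Int) = bs
      · rw [if_pos hb] at hx
        simp at hx; omega
      · rw [if_neg hb, pvA_collect_acc] at hx
        rcases List.mem_append.mp hx with h | h
        · simp at h; omega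
        · have := ih (idx + 1) _ x h; omega
    · simp only [pvA_collect, if_neg hc] at hx
      have := ih (idx + 1) bs x hx; omega

theorem pvB_loop_nonpos (l : List (List (String × Int))) (r bs : Int) (h : bs ≤ r) :
    pvB_loop l r bs = (l, r) := by
  induction l with
  | nil => rfl
  | cons art rest ih =>
    have hng : ¬ (r < bs ∧ pvNovelty art ≤ 1) := fun hx => absurd hx.1 (by omega)
    simp [pvB_loop, hng, ih]

theorem pvB_loop_shift (l : List (List (String × Int))) (r bs : Int) :
    pvB_loop l r bs = ((pvB_loop l 0 (bs - r)).1, (pvB_loop l 0 (bs - r)).2 + r) := by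
  induction l generalizing r bs with
  | nil => simp [pvB_loop]
  | cons art rest ih =>
    by_cases hc : pvNovelty art ≤ 1
    · by_cases hr : r < bs
      · simp only [pvB_loop, if_pos (show r < bs ∧ pvNovelty art ≤ 1 from ⟨hr, hc⟩),
          if_pos (show (0:Int) < bs - r ∧ pvNovelty art ≤ 1 from ⟨by omega, hc⟩)]
        rw [ih (r + 1) bs, ih (0 + 1) (bs - r)]
        have he : bs - (r + 1) = bs - r - (0 + 1) := by omega
        rw [he]
        exact Prod.ext rfl (by simp; omega)
      · simp only [pvB_loop,
          if_neg (show ¬ (r < bs ∧ pvNovelty art ≤ 1) from fun hx => hr hx.1),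
          if_neg (show ¬ ((0:Int) < bs - r ∧ pvNovelty art ≤ 1) from fun hx => absurd hx.1 (by omega))]
        rw [ih r bs]
    · simp only [pvB_loop,
        if_neg (show ¬ (r < bs ∧ pvNovelty art ≤ 1) from fun hx => hc hx.2),
        if_neg (show ¬ ((0:Int) < bs - r ∧ pvNovelty art ≤ 1) from fun hx => hc hx.2)]
      rw [ih r bs]

theorem pv_main (l : List (List (String × Int))) (idx bs : Int) (hbs : 1 ≤ bs) :
    pvA_filter l idx (pvA_collect l idx [] bs) = (pvB_loop l 0 bs).1 ∧
    ((pvA_collect l idx [] bs).length : Int) = (pvB_loop l 0 bs).2 := by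
  induction l generalizing idx bs with
  | nil => simp [pvA_collect, pvA_filter, pvB_loop]
  | cons art rest ih =>
    by_cases hc : pvNovelty art ≤ 1
    · have hg : (0 : Int) < bs ∧ pvNovelty art ≤ 1 := ⟨by omega, hc⟩
      simp only [pvA_collect, if_pos hc, List.nil_append, pvB_loop, if_pos hg]
      rw [pvB_loop_shift rest (0 + 1) bs]
      by_cases hb : ((([idx] : List Int)).length : Int) = bs
      · -- break: bs = 1
        have hbs1 : bs = 1 := by simpa using hb.symm
        rw [if_pos hb]
        simp only [List.length_nil, List.length_cons, Nat.cast_one, zero_add]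
        rw [pvB_loop_nonpos rest 0 (bs - 1) (by omega)]
        constructor
        · simp only [pvA_filter, if_pos (List.mem_singleton.mpr rfl)]
          exact pvA_filter_of_lt rest (idx + 1) [idx] (by simp)
        · simp
      · -- no break: bs ≥ 2
        have hbs2 : 2 ≤ bs := by simp at hb; omega
        rw [if_neg hb, pvA_collect_acc rest (idx + 1) [idx] bs]
        obtain ⟨ih1, ih2⟩ := ih (idx + 1) (bs - 1) (by omega)
        simp only [List.singleton_append, List.length_nil, List.length_cons, Nat.cast_one,
          zero_add]
        constructor
        · simp only [pvA_filter, if_pos (List.mem_cons_self)]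
          rw [pvA_filter_cons_lt rest (idx + 1) idx _ (by omega)]
          exact ih1
        · push_cast
          omega
    · simp only [pvA_collect, if_neg hc, pvB_loop,
        if_neg (show ¬ ((0:Int) < bs ∧ pvNovelty art ≤ 1) from fun hx => hc hx.2)]
      obtain ⟨ih1, ih2⟩ := ih (idx + 1) bs hbs
      have hnm : idx ∉ pvA_collect rest (idx + 1) [] bs := fun hm => by
        have := pvA_collect_ge rest (idx + 1) bs idx hm; omega
      simp only [pvA_filter, if_neg hnm]
      exact ⟨congrArg (art :: ·) ih1, ih2⟩

theorem pv_none_low (l : List (List (String × Int))) (idx bs : Int)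
    (h : ∀ art ∈ l, ¬ pvNovelty art ≤ 1) :
    pvA_collect l idx [] bs = [] ∧ pvB_loop l 0 bs = (l, 0) := by
  induction l generalizing idx with
  | nil => simp [pvA_collect, pvB_loop]
  | cons art rest ih =>
    have hc : ¬ pvNovelty art ≤ 1 := h art (by simp)
    obtain ⟨h1, h2⟩ := ih (idx + 1) (fun a ha => h a (by simp [ha]))
    refine ⟨?_, ?_⟩
    · simp only [pvA_collect, if_neg hc]; exact h1
    · simp only [pvB_loop,
        if_neg (show ¬ ((0:Int) < bs ∧ pvNovelty art ≤ 1) from fun hx => hc hx.2), h2]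

theorem pvA_collect_ne_nil (l : List (List (String × Int))) (idx bs : Int)
    (h : ∃ art ∈ l, pvNovelty art ≤ 1) : pvA_collect l idx [] bs ≠ [] := by
  induction l generalizing idx bs with
  | nil => simp at h
  | cons art rest ih =>
    by_cases hc : pvNovelty art ≤ 1
    · simp only [pvA_collect, if_pos hc, List.nil_append]
      by_cases hb : ((([idx] : List Int)).length : Int) = bs
      · rw [if_pos hb]; simp
      · rw [if_neg hb, pvA_collect_acc]; simp
    · simp only [pvA_collect, if_neg hc]
      rcases h with ⟨a, ha, hla⟩
      rcases List.mem_cons.mp ha with rfl | ha'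
      · exact absurd hla hc
      · exact ih (idx + 1) bs ⟨a, ha', hla⟩

-- ===== VERDICT (by name: the statement is the Claim_ definition above) =====
theorem prune_low_novelty_artifacts_spec : Claim_unchanged_prune_low_novelty_artifacts := by
  intro prev bs _ hnd
  unfold prune_low_novelty_artifacts prune_low_novelty_artifacts_alt
  by_cases hbs : 1 ≤ bs
  · obtain ⟨h1, h2⟩ := pv_main prev 0 bs hbs
    exact Prod.ext h1 h2
  · have hlow : ∀ art ∈ prev, ¬ pvNovelty art ≤ 1 := by
      intro art ha hla
      exact hnd ⟨by omega, art, ha, hla⟩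
    obtain ⟨h1, h2⟩ := pv_none_low prev 0 bs hlow
    simp [h1, h2, pvA_filter_of_lt prev 0 [] (by simp)]

theorem prune_low_novelty_artifacts_changed : Claim_changed_prune_low_novelty_artifacts := by
  unfold Claim_changed_prune_low_novelty_artifacts; decide

theorem prune_low_novelty_artifacts_tight : Claim_exact_prune_low_novelty_artifacts := by
  intro prev bs _ hd heq
  obtain ⟨hbs, hex⟩ := hd
  have hB : prune_low_novelty_artifacts_alt prev bs = (prev, 0) := by
    unfold prune_low_novelty_artifacts_alt
    exact pvB_loop_nonpos prev 0 bs hbs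
  have hne := pvA_collect_ne_nil prev 0 bs hex
  have hlen : (pvA_collect prev 0 [] bs).length ≠ 0 := fun h => hne (List.length_eq_zero_iff.mp h)
  have hsnd : ((pvA_collect prev 0 [] bs).length : Int) = 0 := by
    have := congrArg Prod.snd heq
    rw [hB] at this
    exact this
  exact hlen (by exact_mod_cast hsnd)
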